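-- pv_equiv track=rewrite | github.com/ossamamehmood/Hacktoberfest | Add Code Here/PYTHON/Empty_Cell_in_a_Matrix.py | emptyCells
-- ===== SOURCE A (Python) =====
-- def emptyCells(N, K, tasks):
--
-- 	matrix = [[-1 for i in range(N)]for j in range(N)]
-- 	output = []
--
-- 	for _ in tasks:
-- 		x,y = _
--
-- 		for i in range(N):
-- 			matrix[x][i] = 0
--
-- 		for i in range(N):
-- 			matrix[i][y] = 0
--
-- 		count = 0
-- 		for arr in matrix:
-- 			for i in arr:
-- 				if i == -1:
-- 					count += 1
-- 		output.append(count)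
--
-- 	return output
-- ===== SOURCE B (Python) =====
-- def emptyCells(N, K, tasks):
--     if N <= 0:
--         return [0] * len(tasks)
--     row = [False] * N
--     col = [False] * N
--     r = c = N
--     out = []
--     for x, y in tasks:
--         if not row[x]:
--             row[x] = True
--             r -= 1
--         if not col[y]:
--             col[y] = True
--             c -= 1
--         out.append(r * c)
--     return out
-- ===== Notes on version B (the rewrite author's own statement) =====
-- stated objective: faster
-- what changed: B drops the N x N matrix, its re-marking loops and the full-matrix rescan per task; it keeps one boolean marker list per axis and two live counters of unmarked rows/columns, appending r*c per task (an empty matrix, N <= 0, has 0 empty cells per task); Pre_ excludes only the inputs where A raises IndexError (a task index outside [-N, N) with N > 0).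
import Mathlib
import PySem

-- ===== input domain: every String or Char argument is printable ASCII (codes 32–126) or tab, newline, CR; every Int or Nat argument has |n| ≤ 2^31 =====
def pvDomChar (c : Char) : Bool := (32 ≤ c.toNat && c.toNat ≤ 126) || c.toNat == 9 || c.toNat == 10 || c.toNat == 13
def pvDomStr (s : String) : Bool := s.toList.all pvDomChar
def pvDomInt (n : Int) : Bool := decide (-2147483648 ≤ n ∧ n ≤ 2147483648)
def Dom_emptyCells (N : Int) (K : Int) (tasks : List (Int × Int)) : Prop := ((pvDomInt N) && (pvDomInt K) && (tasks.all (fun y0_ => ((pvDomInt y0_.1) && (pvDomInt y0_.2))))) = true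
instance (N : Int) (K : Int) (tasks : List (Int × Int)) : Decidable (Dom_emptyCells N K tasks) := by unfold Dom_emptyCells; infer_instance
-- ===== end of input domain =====

-- B replaces A's N×N matrix re-marking and full N² rescan per task by one boolean marker
-- list per axis and two live counters of unmarked rows/columns, appending r*c per task
-- (objective: faster).

-- ===== PORT A =====
def emptyCells (N : Int) (K : Int) (tasks : List (Int × Int)) : List Int :=
  let matrix : List (List Int) :=
    (PySem.List.pyRange 0 N 1).map (fun _ => (PySem.List.pyRange 0 N 1).map (fun _ => (-1 : Int)))
  (tasks.foldl (fun (st : List (List Int) × List Int) t =>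
      let x := t.1
      let y := t.2
      let m1 := (PySem.List.pyRange 0 N 1).foldl
        (fun m i => PySem.List.pySetD m x (PySem.List.pySetD (PySem.List.pyGetD m x []) i 0)) st.1
      let m2 := (PySem.List.pyRange 0 N 1).foldl
        (fun m i => PySem.List.pySetD m i (PySem.List.pySetD (PySem.List.pyGetD m i []) y 0)) m1
      let count := m2.foldl (fun c arr => arr.foldl (fun c v => if v = -1 then c + 1 else c) c) (0 : Int)
      (m2, st.2 ++ [count]))
    (matrix, [])).2

-- ===== PORT B =====
def emptyCells_alt (N : Int) (K : Int) (tasks : List (Int × Int)) : List Int :=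
  if N ≤ 0 then List.replicate tasks.length (0 : Int) else
  (tasks.foldl (fun (st : List Bool × List Bool × Int × Int × List Int) t =>
      let rowr := if !(PySem.List.pyGetD st.1 t.1 false)
                  then (PySem.List.pySetD st.1 t.1 true, st.2.2.1 - 1)
                  else (st.1, st.2.2.1)
      let colc := if !(PySem.List.pyGetD st.2.1 t.2 false)
                  then (PySem.List.pySetD st.2.1 t.2 true, st.2.2.2.1 - 1)
                  else (st.2.1, st.2.2.2.1)
      (rowr.1, colc.1, rowr.2, colc.2, st.2.2.2.2 ++ [rowr.2 * colc.2]))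
    (List.replicate N.toNat false, List.replicate N.toNat false, N, N, [])).2.2.2.2

-- ===== PRECONDITION & SPEC =====
-- Pre_ excludes exactly the inputs on which A raises IndexError: N > 0 with some task
-- index outside [-N, N); for N ≤ 0 the marking loops never index the empty matrix and
-- every such input satisfies Pre_, so Pre_ admits all inputs on which A returns.
def Pre_emptyCells (N : Int) (K : Int) (tasks : List (Int × Int)) : Prop :=
  N ≤ 0 ∨ ∀ t ∈ tasks, -N ≤ t.1 ∧ t.1 < N ∧ -N ≤ t.2 ∧ t.2 < N
instance (N : Int) (K : Int) (tasks : List (Int × Int)) : Decidable (Pre_emptyCells N K tasks) := by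
  unfold Pre_emptyCells; infer_instance

def pvWitness_emptyCells : Int × Int × (List (Int × Int)) := (3, 0, [(1, 2), (-3, 0)])

def Spec_emptyCells (N : Int) (K : Int) (tasks : List (Int × Int)) (out : List Int) : Prop := out = emptyCells_alt N K tasks
instance (N : Int) (K : Int) (tasks : List (Int × Int)) (out : List Int) : Decidable (Spec_emptyCells N K tasks out) := by unfold Spec_emptyCells; infer_instance

-- ===== CLAIM (what is proved, stated in full; the proofs are below) =====
def Claim_equal_emptyCells : Prop := ∀ (N : Int) (K : Int) (tasks : List (Int × Int)), Dom_emptyCells N K tasks → Pre_emptyCells N K tasks → Spec_emptyCells N K tasks (emptyCells N K tasks)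

-- ===== LEMMAS AND PROOFS =====

def pvCn (N v : Int) : Int := if v < 0 then v + N else v

theorem pySetD_cn {α : Type} (xs : List α) (i : Int) (v : α)
    (h1 : -(xs.length : Int) ≤ i) (h2 : i < xs.length) :
    PySem.List.pySetD xs i v = xs.set (pvCn xs.length i).toNat v := by
  simp only [PySem.List.pySetD, PySem.List.pySet?, PySem.List.pyIdx?, pvCn]
  split_ifs with h3 h4 h5 <;> simp_all <;> try omega
  · congr 1; omega

-- zeroing every entry of a row
theorem rowZero (k : Nat) : ∀ (row : List Int), k ≤ row.length →
    (PySem.List.pyRange 0 k 1).foldl (fun r i => PySem.List.pySetD r i 0) row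
      = List.replicate k 0 ++ row.drop k := by
  induction k with
  | zero => intro row _; simp [PySem.List.pyRange_one_eq_nil]
  | succ k ih =>
    intro row hk
    have hs : ((k + 1 : Nat) : Int) = (k : Int) + 1 := by push_cast; ring
    rw [hs, PySem.List.pyRange_one_succ_right (by omega : (0:Int) ≤ (k:Int)), List.foldl_append]
    rw [ih row (by omega)]
    simp only [List.foldl_cons, List.foldl_nil]
    rw [pySetD_cn _ _ _ (by simp; omega) (by simp; omega)]
    have hcn : (pvCn ((List.replicate k (0:Int) ++ row.drop k).length) (k : Int)).toNat = k := by
      simp only [pvCn]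
      rw [if_neg (by omega)]
      simp
    rw [hcn, List.set_append_right _ _ (by simp), List.drop_eq_getElem_cons (show k < row.length by omega)]
    simp only [List.length_replicate, Nat.sub_self, List.set_cons_zero]
    rw [List.replicate_succ' (n := k)]
    simp

theorem pyGetD_cn {α : Type} (xs : List α) (i : Int) (d : α)
    (h1 : -(xs.length : Int) ≤ i) (h2 : i < xs.length) :
    PySem.List.pyGetD xs i d = xs.getD (pvCn xs.length i).toNat d := by
  simp only [PySem.List.pyGetD, PySem.List.pyGet?, PySem.List.pyIdx?, pvCn, List.getD_eq_getElem?_getD]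
  split_ifs with h3 h4 h5 <;> simp_all <;> try omega
  · congr 2; omega

-- the row-marking loop touches only row (pvCn x)
theorem rowLoop (x : Int) (L : List Int) : ∀ (m : List (List Int)),
    -(m.length : Int) ≤ x → x < m.length →
    L.foldl (fun m i => PySem.List.pySetD m x (PySem.List.pySetD (PySem.List.pyGetD m x []) i 0)) m
      = m.set (pvCn m.length x).toNat
          (L.foldl (fun r i => PySem.List.pySetD r i 0) (m.getD (pvCn m.length x).toNat [])) := by
  induction L with
  | nil =>
    intro m h1 h2
    simp only [List.foldl_nil]
    have hr : (pvCn m.length x).toNat < m.length := by simp [pvCn]; split_ifs <;> omega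
    rw [List.getD_eq_getElem?_getD, List.getElem?_eq_getElem hr]
    simp [List.set_getElem_self]
  | cons i L ih =>
    intro m h1 h2
    simp only [List.foldl_cons]
    rw [pySetD_cn _ _ _ h1 h2, pyGetD_cn _ _ _ h1 h2]
    have hr : (pvCn m.length x).toNat < m.length := by simp [pvCn]; split_ifs <;> omega
    rw [ih _ (by simpa using h1) (by simpa using h2)]
    simp only [List.length_set]
    have hgd : ∀ w : List Int, (m.set (pvCn m.length x).toNat w).getD (pvCn m.length x).toNat [] = w := by
      intro w
      rw [List.getD_eq_getElem?_getD, List.getElem?_eq_getElem (by simpa using hr),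
        List.getElem_set, if_pos rfl]
      rfl
    rw [hgd, List.set_set]

-- the column-marking loop applies pySetD · y 0 to every row
theorem colLoop (y : Int) (k : Nat) : ∀ (m : List (List Int)), k ≤ m.length →
    (PySem.List.pyRange 0 k 1).foldl
        (fun m i => PySem.List.pySetD m i (PySem.List.pySetD (PySem.List.pyGetD m i []) y 0)) m
      = (m.take k).map (fun row => PySem.List.pySetD row y 0) ++ m.drop k := by
  induction k with
  | zero => intro m _; simp [PySem.List.pyRange_one_eq_nil]
  | succ k ih =>
    intro m hk
    have hs : ((k + 1 : Nat) : Int) = (k : Int) + 1 := by push_cast; ring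
    rw [hs, PySem.List.pyRange_one_succ_right (by omega : (0:Int) ≤ (k:Int)), List.foldl_append]
    rw [ih m (by omega)]
    simp only [List.foldl_cons, List.foldl_nil]
    set M := (m.take k).map (fun row => PySem.List.pySetD row y 0) ++ m.drop k with hM
    have hkm : k < m.length := by omega
    have hlen : M.length = m.length := by rw [hM]; simp; omega
    have hcn : (pvCn M.length (k:Int)).toNat = k := by
      simp only [pvCn]; rw [if_neg (by omega)]; simp
    rw [pyGetD_cn M (k:Int) [] (by rw [hlen]; omega) (by rw [hlen]; exact_mod_cast hkm)]
    rw [pySetD_cn M (k:Int) _ (by rw [hlen]; omega) (by rw [hlen]; exact_mod_cast hkm)]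
    rw [hcn]
    have htl0 : ((m.take k).map (fun row => PySem.List.pySetD row y 0)).length = k := by simp; omega
    have hgd : M.getD k [] = m[k] := by
      rw [hM, List.getD_eq_getElem?_getD, List.getElem?_append_right (by rw [htl0])]
      have hidx : k - min k m.length = 0 := by omega
      simp only [List.length_map, List.length_take, hidx, List.getElem?_drop, Nat.add_zero]
      rw [List.getElem?_eq_getElem hkm]
      rfl
    rw [hgd, hM, List.set_append_right _ _ (by simp),
      List.drop_eq_getElem_cons hkm]
    have htl : ((m.take k).map (fun row => PySem.List.pySetD row y 0)).length = k := by simp; omega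
    rw [htl]
    simp only [Nat.sub_self, List.set_cons_zero, List.map_take]
    have hm : (List.map (fun row => PySem.List.pySetD row y 0) m)[k]? = some (PySem.List.pySetD m[k] y 0) := by
      rw [List.getElem?_map, List.getElem?_eq_getElem hkm]
      rfl
    rw [List.take_add_one, hm]
    simp

def pvMat (N : Int) (R C : List Int) : List (List Int) :=
  (PySem.List.pyRange 0 N 1).map (fun j =>
    (PySem.List.pyRange 0 N 1).map (fun i => if j ∈ R ∨ i ∈ C then (0 : Int) else -1))

theorem length_pyRangeN (N : Int) : (PySem.List.pyRange 0 N 1).length = N.toNat := by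
  rw [PySem.List.length_pyRange_one]; simp

theorem pvMat_congr (N : Int) (R C R' C' : List Int)
    (hR : ∀ a, a ∈ R ↔ a ∈ R') (hC : ∀ a, a ∈ C ↔ a ∈ C') :
    pvMat N R C = pvMat N R' C' := by
  unfold pvMat
  apply List.map_congr_left
  intro j _
  apply List.map_congr_left
  intro i _
  exact if_congr (or_congr (hR j) (hC i)) rfl rfl

-- marking column (pvCn N y) in an unmarked-pattern row
theorem rowMark (N y : Int) (hN : 0 < N) (hy1 : -N ≤ y) (hy2 : y < N)
    (P P' : Int → Prop) [DecidablePred P] [DecidablePred P']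
    (hP : ∀ i, 0 ≤ i → i < N → (P' i ↔ (P i ∨ i = pvCn N y))) :
    PySem.List.pySetD ((PySem.List.pyRange 0 N 1).map (fun i => if P i then (0:Int) else -1)) y 0
      = (PySem.List.pyRange 0 N 1).map (fun i => if P' i then (0:Int) else -1) := by
  have hlen : ((PySem.List.pyRange 0 N 1).map (fun i => if P i then (0:Int) else -1)).length = N.toNat := by
    simp [length_pyRangeN]
  rw [pySetD_cn _ _ _ (by rw [hlen]; omega) (by rw [hlen]; omega)]
  have hcy : 0 ≤ pvCn N y ∧ pvCn N y < N := by simp [pvCn]; split_ifs <;> omega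
  have hcnn : (pvCn ((PySem.List.pyRange 0 N 1).map (fun i => if P i then (0:Int) else -1)).length y) = pvCn N y := by
    rw [hlen]; simp only [pvCn]; split_ifs <;> omega
  rw [hcnn]
  apply List.ext_getElem
  · simp [hlen]
  · intro i h1 h2
    rw [List.getElem_set]
    have hi : i < (PySem.List.pyRange 0 N 1).length := by simpa using h2
    have hpy : (PySem.List.pyRange 0 N 1)[i] = (i : Int) := by
      rw [PySem.List.getElem_pyRange_one]; simp
    split_ifs with he
    · rw [List.getElem_map, hpy]
      rw [if_pos]
      rw [hP _ (by omega) (by rw [length_pyRangeN] at hi; omega)]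
      right
      omega
    · rw [List.getElem_map, List.getElem_map, hpy]
      have hne : (i : Int) ≠ pvCn N y := by omega
      have : P' (i:Int) ↔ P (i:Int) := by
        rw [hP _ (by omega) (by rw [length_pyRangeN] at hi; omega)]
        simp [hne]
      rw [if_congr this.symm rfl rfl]

-- one task's two marking loops turn pvMat R C into pvMat (cn x :: R) (cn y :: C)
theorem matStep (N x y : Int) (hN : 0 < N) (hx1 : -N ≤ x) (hx2 : x < N)
    (hy1 : -N ≤ y) (hy2 : y < N) (R C : List Int) :
    (PySem.List.pyRange 0 N 1).foldl
      (fun m i => PySem.List.pySetD m i (PySem.List.pySetD (PySem.List.pyGetD m i []) y 0))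
      ((PySem.List.pyRange 0 N 1).foldl
        (fun m i => PySem.List.pySetD m x (PySem.List.pySetD (PySem.List.pyGetD m x []) i 0))
        (pvMat N R C))
      = pvMat N (pvCn N x :: R) (pvCn N y :: C) := by
  have hn : ((N.toNat : Nat) : Int) = N := by omega
  have hlenM : (pvMat N R C).length = N.toNat := by simp [pvMat, length_pyRangeN]
  have hcx : 0 ≤ pvCn N x ∧ pvCn N x < N := by simp [pvCn]; split_ifs <;> omega
  have hrx : (pvCn N x).toNat < N.toNat := by omega
  -- row loop
  rw [rowLoop x _ _ (by rw [hlenM]; omega) (by rw [hlenM]; omega)]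
  have hcnM : pvCn ((pvMat N R C).length) x = pvCn N x := by
    rw [hlenM]; simp only [pvCn]; split_ifs <;> omega
  rw [hcnM]
  have hrow : (pvMat N R C).getD (pvCn N x).toNat [] =
      (PySem.List.pyRange 0 N 1).map (fun i => if ((pvCn N x).toNat : Int) ∈ R ∨ i ∈ C then (0:Int) else -1) := by
    rw [List.getD_eq_getElem?_getD, List.getElem?_eq_getElem (by rw [hlenM]; exact hrx)]
    unfold pvMat
    rw [List.getElem_map]
    rw [PySem.List.getElem_pyRange_one]
    simp
  rw [hrow]
  have hrowlen : ((PySem.List.pyRange 0 N 1).map (fun i => if ((pvCn N x).toNat : Int) ∈ R ∨ i ∈ C then (0:Int) else -1)).length = N.toNat := by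
    simp [length_pyRangeN]
  -- rewrite the fold range to a Nat bound and zero the row
  have hzero : (PySem.List.pyRange 0 N 1).foldl (fun r i => PySem.List.pySetD r i 0)
      ((PySem.List.pyRange 0 N 1).map (fun i => if ((pvCn N x).toNat : Int) ∈ R ∨ i ∈ C then (0:Int) else -1))
      = List.replicate N.toNat 0 := by
    have := rowZero N.toNat ((PySem.List.pyRange 0 N 1).map (fun i => if ((pvCn N x).toNat : Int) ∈ R ∨ i ∈ C then (0:Int) else -1)) (by rw [hrowlen])
    rw [hn] at this
    rw [this, List.drop_eq_nil_of_le (by rw [hrowlen])]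
    simp
  rw [hzero]
  -- column loop
  have hlen1 : ((pvMat N R C).set (pvCn N x).toNat (List.replicate N.toNat 0)).length = N.toNat := by
    simp [hlenM]
  have hcol := colLoop y N.toNat ((pvMat N R C).set (pvCn N x).toNat (List.replicate N.toNat 0)) (by rw [hlen1])
  rw [hn] at hcol
  rw [hcol, List.take_of_length_le (by rw [hlen1]), List.drop_eq_nil_of_le (by rw [hlen1]), List.append_nil]
  -- extensional comparison with the target matrix
  apply List.ext_getElem
  · simp [hlen1, pvMat, length_pyRangeN]
  · intro j h1 h2
    have hj : j < N.toNat := by rw [List.length_map, hlen1] at h1; exact h1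
    rw [List.getElem_map, List.getElem_set]
    have hpyj : (PySem.List.pyRange 0 N 1)[j]'(by rw [length_pyRangeN]; exact hj) = (j : Int) := by
      rw [PySem.List.getElem_pyRange_one]; simp
    have hrhs : (pvMat N (pvCn N x :: R) (pvCn N y :: C))[j]'h2
        = (PySem.List.pyRange 0 N 1).map (fun i => if (j:Int) ∈ (pvCn N x :: R) ∨ i ∈ (pvCn N y :: C) then (0:Int) else -1) := by
      unfold pvMat
      rw [List.getElem_map, PySem.List.getElem_pyRange_one]
      simp
    rw [hrhs]
    split_ifs with he
    · -- the marked row: all zeros on both sides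
      have hjx : (j : Int) = pvCn N x := by omega
      have hrep : (List.replicate N.toNat (0:Int)) = (PySem.List.pyRange 0 N 1).map (fun i => if (True : Prop) then (0:Int) else -1) := by
        simp [List.map_const', length_pyRangeN]
      rw [hrep, rowMark N y hN hy1 hy2 (fun _ => (True : Prop)) (fun i => (j:Int) ∈ (pvCn N x :: R) ∨ i ∈ (pvCn N y :: C))]
      intro i _ _
      constructor
      · intro _
        left
        trivial
      · intro _
        left
        rw [hjx]
        exact List.mem_cons_self
    · -- an unmarked row
      unfold pvMat
      rw [List.getElem_map, hpyj]
      rw [rowMark N y hN hy1 hy2 (fun i => (j:Int) ∈ R ∨ i ∈ C) (fun i => (j:Int) ∈ (pvCn N x :: R) ∨ i ∈ (pvCn N y :: C)) ?_]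
      intro i hi0 hiN
      constructor
      · intro h
        rcases h with h | h
        · rcases List.mem_cons.mp h with h' | h'
          · exfalso; apply he; omega
          · exact Or.inl (Or.inl h')
        · rcases List.mem_cons.mp h with h' | h'
          · exact Or.inr h'
          · exact Or.inl (Or.inr h')
      · intro h
        rcases h with (h | h) | h
        · exact Or.inl (List.mem_cons_of_mem _ h)
        · exact Or.inr (List.mem_cons_of_mem _ h)
        · rw [h]; exact Or.inr List.mem_cons_self

theorem countMemRange (N : Int) (C : List Int) (hCn : C.Nodup)
    (hC : ∀ c ∈ C, 0 ≤ c ∧ c < N) :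
    List.countP (fun i => decide (i ∈ C)) (PySem.List.pyRange 0 N 1) = C.length := by
  rw [List.countP_eq_length_filter]
  have hperm : ((PySem.List.pyRange 0 N 1).filter (fun i => decide (i ∈ C))).Perm C := by
    rw [List.perm_ext_iff_of_nodup ((PySem.List.nodup_pyRange_one 0 N).filter _) hCn]
    intro a
    simp only [List.mem_filter, PySem.List.mem_pyRange_one, decide_eq_true_eq]
    constructor
    · exact fun h => h.2
    · intro h
      exact ⟨⟨(hC a h).1, (hC a h).2⟩, h⟩
  exact hperm.length_eq

theorem countNotMemRange (N : Int) (C : List Int) (hCn : C.Nodup)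
    (hC : ∀ c ∈ C, 0 ≤ c ∧ c < N) :
    List.countP (fun i => !decide (i ∈ C)) (PySem.List.pyRange 0 N 1) = N.toNat - C.length := by
  have h := List.length_eq_countP_add_countP (fun i => decide (i ∈ C)) (l := PySem.List.pyRange 0 N 1)
  rw [length_pyRangeN, countMemRange N C hCn hC] at h
  have heq : List.countP (fun a => decide ¬(decide (a ∈ C)) = true) (PySem.List.pyRange 0 N 1)
      = List.countP (fun i => !decide (i ∈ C)) (PySem.List.pyRange 0 N 1) := by
    apply List.countP_congr
    intro a _
    simp
  omega

theorem countMat (N : Int) (hN : 0 < N) (R C : List Int) (hRn : R.Nodup) (hCn : C.Nodup)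
    (hR : ∀ r ∈ R, 0 ≤ r ∧ r < N) (hC : ∀ c ∈ C, 0 ≤ c ∧ c < N) :
    (pvMat N R C).foldl (fun c arr => arr.foldl (fun c v => if v = -1 then c + 1 else c) c) (0 : Int)
      = (N - R.length) * (N - C.length) := by
  have hRle : R.length ≤ N.toNat := by
    have : R.Subperm (PySem.List.pyRange 0 N 1) := by
      apply List.subperm_of_subset hRn
      intro a ha
      rw [PySem.List.mem_pyRange_one]
      exact ⟨(hR a ha).1, (hR a ha).2⟩
    have := this.length_le
    rw [length_pyRangeN] at this
    exact this
  have hCle : C.length ≤ N.toNat := by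
    have : C.Subperm (PySem.List.pyRange 0 N 1) := by
      apply List.subperm_of_subset hCn
      intro a ha
      rw [PySem.List.mem_pyRange_one]
      exact ⟨(hC a ha).1, (hC a ha).2⟩
    have := this.length_le
    rw [length_pyRangeN] at this
    exact this
  simp only [PySem.List.foldl_ite_add_one]
  rw [show (fun (c : Int) (arr : List Int) => c + ((List.countP (fun v => decide (v = -1)) arr : Nat) : Int))
      = fun c arr => c + (fun arr => ((List.countP (fun v => decide (v = -1)) arr : Nat) : Int)) arr from rfl]
  rw [PySem.List.foldl_add]
  unfold pvMat
  rw [List.map_map, zero_add]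
  have hrowcount : ∀ j : Int, 0 ≤ j → j < N →
      ((List.countP (fun v => decide (v = -1))
        ((PySem.List.pyRange 0 N 1).map (fun i => if j ∈ R ∨ i ∈ C then (0:Int) else -1)) : Nat) : Int)
      = if j ∈ R then 0 else ((N.toNat - C.length : Nat) : Int) := by
    intro j hj0 hjN
    rw [List.countP_map]
    by_cases hjR : j ∈ R
    · rw [if_pos hjR]
      rw [List.countP_eq_zero.mpr]
      · simp
      · intro i _
        simp [hjR]
    · rw [if_neg hjR]
      have : List.countP ((fun v => decide (v = -1)) ∘ fun i => if j ∈ R ∨ i ∈ C then (0:Int) else -1) (PySem.List.pyRange 0 N 1)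
          = List.countP (fun i => !decide (i ∈ C)) (PySem.List.pyRange 0 N 1) := by
        apply List.countP_congr
        intro i _
        simp only [Function.comp, hjR, false_or]
        split_ifs with h <;> simp [h]
      rw [this, countNotMemRange N C hCn hC]
  have hmapeq : ((PySem.List.pyRange 0 N 1).map
        ((fun arr => ((List.countP (fun v => decide (v = -1)) arr : Nat) : Int)) ∘
          (fun j => (PySem.List.pyRange 0 N 1).map (fun i => if j ∈ R ∨ i ∈ C then (0:Int) else -1))))
      = (PySem.List.pyRange 0 N 1).map (fun j => if j ∈ R then (0:Int) else ((N.toNat - C.length : Nat) : Int)) := by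
    apply List.map_congr_left
    intro j hjmem
    rw [PySem.List.mem_pyRange_one] at hjmem
    exact hrowcount j hjmem.1 hjmem.2
  rw [hmapeq]
  have hsplit : (fun j => if j ∈ R then (0:Int) else ((N.toNat - C.length : Nat) : Int))
      = fun j => (if (!decide (j ∈ R)) = true then (1:Int) else 0) * ((N.toNat - C.length : Nat) : Int) := by
    funext j
    by_cases h : j ∈ R <;> simp [h]
  rw [hsplit, List.sum_map_mul_right, PySem.List.sum_map_ite_one_zero,
    countNotMemRange N R hRn hR]
  have hn' : ((N.toNat : Nat) : Int) = N := by omega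
  push_cast [hRle, hCle, hn']
  ring

-- B-side: reading the marker list at a (possibly negative) index
theorem pyGetD_mapRange (N x : Int) {α : Type} (f : Int → α) (d : α)
    (h1 : -N ≤ x) (h2 : x < N) :
    PySem.List.pyGetD ((PySem.List.pyRange 0 N 1).map f) x d = f (pvCn N x) := by
  have hlen : ((PySem.List.pyRange 0 N 1).map f).length = N.toNat := by simp [length_pyRangeN]
  rw [pyGetD_cn _ _ _ (by rw [hlen]; omega) (by rw [hlen]; omega)]
  have hcn : pvCn ((PySem.List.pyRange 0 N 1).map f).length x = pvCn N x := by
    rw [hlen]; simp only [pvCn]; split_ifs <;> omega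
  rw [hcn]
  have hix : (pvCn N x).toNat < N.toNat := by simp [pvCn]; split_ifs <;> omega
  rw [List.getD_eq_getElem?_getD, List.getElem?_map,
    List.getElem?_eq_getElem (by rw [length_pyRangeN]; exact hix)]
  simp only [Option.map_some, Option.getD_some]
  congr 1
  rw [PySem.List.getElem_pyRange_one]
  simp only [pvCn]
  split_ifs <;> omega

-- B-side: marking index (pvCn N x) in the marker list
theorem pySetD_mapRange (N x : Int) (hN : 0 < N) (h1 : -N ≤ x) (h2 : x < N)
    (f g : Int → Bool)
    (hfg : ∀ i, 0 ≤ i → i < N → g i = (f i || decide (i = pvCn N x))) :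
    PySem.List.pySetD ((PySem.List.pyRange 0 N 1).map f) x true
      = (PySem.List.pyRange 0 N 1).map g := by
  have hlen : ((PySem.List.pyRange 0 N 1).map f).length = N.toNat := by simp [length_pyRangeN]
  rw [pySetD_cn _ _ _ (by rw [hlen]; omega) (by rw [hlen]; omega)]
  have hcx : 0 ≤ pvCn N x ∧ pvCn N x < N := by simp [pvCn]; split_ifs <;> omega
  have hcnn : pvCn ((PySem.List.pyRange 0 N 1).map f).length x = pvCn N x := by
    rw [hlen]; simp only [pvCn]; split_ifs <;> omega
  rw [hcnn]
  apply List.ext_getElem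
  · simp [hlen]
  · intro i hL1 hL2
    rw [List.getElem_set]
    have hi : i < (PySem.List.pyRange 0 N 1).length := by simpa using hL2
    have hpy : (PySem.List.pyRange 0 N 1)[i] = (i : Int) := by
      rw [PySem.List.getElem_pyRange_one]; simp
    have hiN : (i : Int) < N := by
      rw [length_pyRangeN] at hi; omega
    split_ifs with he
    · rw [List.getElem_map, hpy, hfg _ (by omega) hiN]
      have : (i : Int) = pvCn N x := by omega
      simp [this]
    · rw [List.getElem_map, List.getElem_map, hpy, hfg _ (by omega) hiN]
      have : (i : Int) ≠ pvCn N x := by omega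
      simp [this]

-- B-side: one marker update equals adding pvCn N x to the marked set
theorem stepB (N : Int) (hN : 0 < N) (S : PySem.Set Int) (x : Int)
    (h1 : -N ≤ x) (h2 : x < N) :
    (if !(PySem.List.pyGetD ((PySem.List.pyRange 0 N 1).map (fun j => decide (j ∈ S))) x false)
     then (PySem.List.pySetD ((PySem.List.pyRange 0 N 1).map (fun j => decide (j ∈ S))) x true,
           N - (S.length : Int) - 1)
     else ((PySem.List.pyRange 0 N 1).map (fun j => decide (j ∈ S)), N - (S.length : Int)))
    = ((PySem.List.pyRange 0 N 1).map (fun j => decide (j ∈ PySem.Set.add S (pvCn N x))),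
       N - ((PySem.Set.add S (pvCn N x)).length : Int)) := by
  rw [pyGetD_mapRange N x _ false h1 h2]
  by_cases hm : pvCn N x ∈ S
  · rw [PySem.Set.add_of_mem hm]
    simp [hm]
  · rw [PySem.Set.add_of_not_mem hm]
    simp only [hm, decide_false, Bool.not_false, if_pos]
    rw [pySetD_mapRange N x hN h1 h2 (fun j => decide (j ∈ S))
      (fun j => decide (j ∈ S ++ [pvCn N x])) (by intro i _ _; simp [List.mem_append])]
    simp only [List.length_append, List.length_singleton, Prod.mk.injEq, true_and]
    push_cast
    ring

-- joint induction: A's matrix fold and B's marker/counter fold produce the same output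
theorem mainAux (N : Int) (hN : 0 < N) :
    ∀ (ts : List (Int × Int)) (R C : PySem.Set Int) (out : List Int),
    R.Nodup → C.Nodup → (∀ a ∈ R, 0 ≤ a ∧ a < N) → (∀ a ∈ C, 0 ≤ a ∧ a < N) →
    (∀ t ∈ ts, -N ≤ t.1 ∧ t.1 < N ∧ -N ≤ t.2 ∧ t.2 < N) →
    (ts.foldl (fun (st : List (List Int) × List Int) t =>
      let x := t.1
      let y := t.2
      let m1 := (PySem.List.pyRange 0 N 1).foldl
        (fun m i => PySem.List.pySetD m x (PySem.List.pySetD (PySem.List.pyGetD m x []) i 0)) st.1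
      let m2 := (PySem.List.pyRange 0 N 1).foldl
        (fun m i => PySem.List.pySetD m i (PySem.List.pySetD (PySem.List.pyGetD m i []) y 0)) m1
      let count := m2.foldl (fun c arr => arr.foldl (fun c v => if v = -1 then c + 1 else c) c) (0 : Int)
      (m2, st.2 ++ [count])) (pvMat N R C, out)).2
    = (ts.foldl (fun (st : List Bool × List Bool × Int × Int × List Int) t =>
      let rowr := if !(PySem.List.pyGetD st.1 t.1 false)
                  then (PySem.List.pySetD st.1 t.1 true, st.2.2.1 - 1)
                  else (st.1, st.2.2.1)
      let colc := if !(PySem.List.pyGetD st.2.1 t.2 false)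
                  then (PySem.List.pySetD st.2.1 t.2 true, st.2.2.2.1 - 1)
                  else (st.2.1, st.2.2.2.1)
      (rowr.1, colc.1, rowr.2, colc.2, st.2.2.2.2 ++ [rowr.2 * colc.2]))
      ((PySem.List.pyRange 0 N 1).map (fun j => decide (j ∈ R)),
       (PySem.List.pyRange 0 N 1).map (fun j => decide (j ∈ C)),
       N - (R.length : Int), N - (C.length : Int), out)).2.2.2.2 := by
  intro ts
  induction ts with
  | nil => intro R C out _ _ _ _ _; rfl
  | cons t ts ih =>
    intro R C out hRn hCn hRb hCb hpre
    obtain ⟨hx1, hx2, hy1, hy2⟩ := hpre t List.mem_cons_self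
    have hpre' : ∀ t' ∈ ts, -N ≤ t'.1 ∧ t'.1 < N ∧ -N ≤ t'.2 ∧ t'.2 < N :=
      fun t' ht' => hpre t' (List.mem_cons_of_mem _ ht')
    have hcxb : 0 ≤ pvCn N t.1 ∧ pvCn N t.1 < N := by simp [pvCn]; split_ifs <;> omega
    have hcyb : 0 ≤ pvCn N t.2 ∧ pvCn N t.2 < N := by simp [pvCn]; split_ifs <;> omega
    have hRb' : ∀ a ∈ PySem.Set.add R (pvCn N t.1), 0 ≤ a ∧ a < N := by
      intro a ha
      rcases (PySem.Set.mem_add _ _ _).mp ha with h | h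
      · exact hRb a h
      · rw [h]; exact hcxb
    have hCb' : ∀ a ∈ PySem.Set.add C (pvCn N t.2), 0 ≤ a ∧ a < N := by
      intro a ha
      rcases (PySem.Set.mem_add _ _ _).mp ha with h | h
      · exact hCb a h
      · rw [h]; exact hcyb
    rw [List.foldl_cons, List.foldl_cons]
    -- A's step
    have hstepA : (
      let x := t.1
      let y := t.2
      let m1 := (PySem.List.pyRange 0 N 1).foldl
        (fun m i => PySem.List.pySetD m x (PySem.List.pySetD (PySem.List.pyGetD m x []) i 0)) (pvMat N R C, out).1
      let m2 := (PySem.List.pyRange 0 N 1).foldl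
        (fun m i => PySem.List.pySetD m i (PySem.List.pySetD (PySem.List.pyGetD m i []) y 0)) m1
      let count := m2.foldl (fun c arr => arr.foldl (fun c v => if v = -1 then c + 1 else c) c) (0 : Int)
      (m2, (pvMat N R C, out).2 ++ [count]))
      = (pvMat N (PySem.Set.add R (pvCn N t.1)) (PySem.Set.add C (pvCn N t.2)),
         out ++ [(N - ((PySem.Set.add R (pvCn N t.1)).length : Int)) * (N - ((PySem.Set.add C (pvCn N t.2)).length : Int))]) := by
      dsimp only
      rw [matStep N t.1 t.2 hN hx1 hx2 hy1 hy2 R C]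
      rw [pvMat_congr N (pvCn N t.1 :: R) (pvCn N t.2 :: C)
            (PySem.Set.add R (pvCn N t.1)) (PySem.Set.add C (pvCn N t.2))
            (fun a => by rw [List.mem_cons, PySem.Set.mem_add]; tauto)
            (fun a => by rw [List.mem_cons, PySem.Set.mem_add]; tauto)]
      rw [countMat N hN _ _ (PySem.Set.nodup_add _ _ hRn) (PySem.Set.nodup_add _ _ hCn) hRb' hCb']
    rw [hstepA]
    -- B's step
    have hstepB : (
      let rowr := if !(PySem.List.pyGetD ((PySem.List.pyRange 0 N 1).map (fun j => decide (j ∈ R))) t.1 false)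
                  then (PySem.List.pySetD ((PySem.List.pyRange 0 N 1).map (fun j => decide (j ∈ R))) t.1 true,
                        (N - (R.length : Int)) - 1)
                  else ((PySem.List.pyRange 0 N 1).map (fun j => decide (j ∈ R)), N - (R.length : Int))
      let colc := if !(PySem.List.pyGetD ((PySem.List.pyRange 0 N 1).map (fun j => decide (j ∈ C))) t.2 false)
                  then (PySem.List.pySetD ((PySem.List.pyRange 0 N 1).map (fun j => decide (j ∈ C))) t.2 true,
                        (N - (C.length : Int)) - 1)
                  else ((PySem.List.pyRange 0 N 1).map (fun j => decide (j ∈ C)), N - (C.length : Int))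
      ((rowr.1, colc.1, rowr.2, colc.2, out ++ [rowr.2 * colc.2]) : List Bool × List Bool × Int × Int × List Int))
      = ((PySem.List.pyRange 0 N 1).map (fun j => decide (j ∈ PySem.Set.add R (pvCn N t.1))),
         (PySem.List.pyRange 0 N 1).map (fun j => decide (j ∈ PySem.Set.add C (pvCn N t.2))),
         N - ((PySem.Set.add R (pvCn N t.1)).length : Int),
         N - ((PySem.Set.add C (pvCn N t.2)).length : Int),
         out ++ [(N - ((PySem.Set.add R (pvCn N t.1)).length : Int)) * (N - ((PySem.Set.add C (pvCn N t.2)).length : Int))]) := by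
      rw [show (N - (R.length : Int)) - 1 = N - (R.length : Int) - 1 from rfl]
      rw [stepB N hN R t.1 hx1 hx2, stepB N hN C t.2 hy1 hy2]
    rw [hstepB]
    exact ih _ _ _ (PySem.Set.nodup_add _ _ hRn) (PySem.Set.nodup_add _ _ hCn) hRb' hCb' hpre'

-- A with N ≤ 0: the matrix is empty, every count is 0
theorem negAux (N : Int) (hN : N ≤ 0) :
    ∀ (ts : List (Int × Int)) (out : List Int),
    (ts.foldl (fun (st : List (List Int) × List Int) t =>
      let x := t.1
      let y := t.2
      let m1 := (PySem.List.pyRange 0 N 1).foldl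
        (fun m i => PySem.List.pySetD m x (PySem.List.pySetD (PySem.List.pyGetD m x []) i 0)) st.1
      let m2 := (PySem.List.pyRange 0 N 1).foldl
        (fun m i => PySem.List.pySetD m i (PySem.List.pySetD (PySem.List.pyGetD m i []) y 0)) m1
      let count := m2.foldl (fun c arr => arr.foldl (fun c v => if v = -1 then c + 1 else c) c) (0 : Int)
      (m2, st.2 ++ [count])) (([] : List (List Int)), out)).2
    = out ++ List.replicate ts.length (0 : Int) := by
  intro ts
  induction ts with
  | nil => intro out; simp
  | cons t ts ih =>
    intro out
    simp only [PySem.List.pyRange_one_eq_nil hN, List.foldl_nil] at ih ⊢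
    exact (ih (out ++ [0])).trans (by simp [List.replicate_succ])

-- ===== VERDICT (by name: the statement is the Claim_ definition above) =====
theorem emptyCells_spec : Claim_equal_emptyCells := by
  intro N K tasks _ hpre
  unfold Spec_emptyCells
  rcases (by omega : N ≤ 0 ∨ 0 < N) with hN | hN
  · unfold emptyCells emptyCells_alt
    rw [if_pos hN]
    have hmat : (PySem.List.pyRange 0 N 1).map (fun _ => (PySem.List.pyRange 0 N 1).map (fun _ => (-1 : Int)))
        = ([] : List (List Int)) := by
      simp [PySem.List.pyRange_one_eq_nil hN]
    rw [hmat]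
    simpa using negAux N hN tasks []
  · have hin : ∀ t ∈ tasks, -N ≤ t.1 ∧ t.1 < N ∧ -N ≤ t.2 ∧ t.2 < N := by
      rcases hpre with h0 | h
      · omega
      · exact h
    have h := mainAux N hN tasks [] [] [] List.nodup_nil List.nodup_nil
      (by simp) (by simp) hin
    simp only [List.length_nil, Nat.cast_zero, sub_zero] at h
    have hmapf : ((PySem.List.pyRange 0 N 1).map (fun j => decide (j ∈ ([] : List Int))))
        = List.replicate N.toNat false := by
      rw [show (fun j : Int => decide (j ∈ ([] : List Int))) = (fun _ => false) from
        funext (fun j => by simp)]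
      rw [List.map_const', length_pyRangeN]
    rw [hmapf] at h
    have hinit : (PySem.List.pyRange 0 N 1).map (fun _ => (PySem.List.pyRange 0 N 1).map (fun _ => (-1 : Int)))
        = pvMat N [] [] := by
      unfold pvMat
      simp
    unfold emptyCells emptyCells_alt
    rw [if_neg (by omega), hinit]
    exact h
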